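-- pv_equiv track=rewrite | github.com/robin3795/sukodu | sudoku.py | uniqueFunction
-- ===== SOURCE A (Python) =====
-- def nineNumberList():
--     tempList = []
--     for i in range(1,10):
--         tempList.append(str(i))
--     return tempList
--
-- def uniqueFunction(group,data):
--     if (len(group) == 9):
--         notDoneList = nineNumberList()
--         notDoneString = ""
--         for item in group:
--             if (len(data[item]) == 1):
--                 notDoneList.remove(str(data[item]))
--             else:
--                 notDoneString = notDoneString + data[item]
--         for numString in notDoneList:
--             if (notDoneString.count(numString) == 1):
--                 for item in group:
--                     if (data[item].count(numString) == 1):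
--                         data[item] = numString
--     return data
-- ===== SOURCE B (Python) =====
-- # B: same task, single index-building pass (candidate-char -> count & holding cell)
-- # then one direct pass over the remaining digits -- no per-digit rescan of the group.
-- # Like A, mutates `data` in place; equivalence claimed is about the return value.
-- def uniqueFunction(group, data):
--     if len(group) == 9:
--         notDoneList = [str(i) for i in range(1, 10)]
--         counts = {}
--         holder = {}
--         for item in group:
--             value = data[item]
--             if len(value) == 1:
--                 notDoneList.remove(str(value))
--             else:
--                 for ch in value:
--                     counts[ch] = counts.get(ch, 0) + 1
--                     holder[ch] = item
--         for numString in notDoneList: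
--             if counts.get(numString, 0) == 1:
--                 cell = holder[numString]
--                 if numString in data[cell]:
--                     data[cell] = numString
--     return data
-- ===== Notes on version B (the rewrite author's own statement) =====
-- stated objective: alternative
-- what changed: A's second phase rescans the whole group (and recounts the whole concatenated candidate string) once per remaining digit; B instead builds, in the single pass over the group, a dict of per-character occurrence counts and a dict mapping each candidate character to the cell holding it, then makes one direct pass over the remaining digits assigning via the index with no rescans.
import Mathlib
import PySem

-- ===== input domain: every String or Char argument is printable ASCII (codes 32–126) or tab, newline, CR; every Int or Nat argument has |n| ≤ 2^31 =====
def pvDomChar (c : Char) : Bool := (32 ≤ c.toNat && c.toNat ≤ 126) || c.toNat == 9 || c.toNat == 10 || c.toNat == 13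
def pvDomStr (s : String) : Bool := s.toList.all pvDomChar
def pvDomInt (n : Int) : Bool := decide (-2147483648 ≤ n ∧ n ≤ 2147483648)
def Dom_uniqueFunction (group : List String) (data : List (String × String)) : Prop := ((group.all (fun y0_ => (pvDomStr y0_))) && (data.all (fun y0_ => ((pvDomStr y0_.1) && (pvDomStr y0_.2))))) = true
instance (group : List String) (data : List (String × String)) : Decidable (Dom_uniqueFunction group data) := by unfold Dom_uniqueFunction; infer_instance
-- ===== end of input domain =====

-- B replaces A's per-digit rescans of the group by one index-building pass (candidate char -> count, holding cell)
-- followed by a single direct pass over the remaining digits. Both A and B mutate `data` in place in Python; the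
-- equivalence proved here is about the return value.

-- ===== PORT A =====
-- strings are handled char-exactly on .toList via PySem.Chars, as the prelude prescribes
def nineNumberList : List String :=
  (PySem.List.pyRange 1 10 1).foldl (fun acc i => acc ++ [PySem.Int.toStr i]) []

-- body of A's innermost loop: `for item in group: if data[item].count(numString) == 1: data[item] = numString`
def ufScanStep (ns : String) (d : PySem.Dict String String) (item : String) : PySem.Dict String String :=
  if PySem.Chars.count (d.getD item "").toList ns.toList == 1 then d.insert item ns else d

-- body of A's loop `for numString in notDoneList: if notDoneString.count(numString) == 1: ...`
def ufStep2A (group : List String) (nds : List Char) (d : PySem.Dict String String) (ns : String) :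
    PySem.Dict String String :=
  if PySem.Chars.count nds ns.toList == 1 then group.foldl (ufScanStep ns) d else d

-- body of A's first loop over group, state = (notDoneList, notDoneString as chars)
def ufStep1A (d0 : PySem.Dict String String) (p : List String × List Char) (item : String) :
    List String × List Char :=
  let v := d0.getD item ""
  if v.toList.length == 1 then ((PySem.List.remove? p.1 v).getD p.1, p.2) else (p.1, p.2 ++ v.toList)

def uniqueFunction (group : List String) (data : List (String × String)) : List (String × String) :=
  if group.length == 9 then
    let d0 : PySem.Dict String String := PySem.Dict.mk data
    let p := group.foldl (ufStep1A d0) (nineNumberList, [])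
    (p.1.foldl (ufStep2A group p.2) d0).items
  else data

-- ===== PORT B =====
-- body of B's `for ch in value: counts[ch] = counts.get(ch, 0) + 1; holder[ch] = item`
def ufIndexStep (item : String) (q : PySem.Dict String Int × PySem.Dict String String) (ch : Char) :
    PySem.Dict String Int × PySem.Dict String String :=
  (q.1.insert (String.ofList [ch]) (q.1.getD (String.ofList [ch]) 0 + 1),
   q.2.insert (String.ofList [ch]) item)

-- body of B's single pass over group, state = (notDoneList, (counts, holder))
def ufStep1B (d0 : PySem.Dict String String)
    (st : List String × (PySem.Dict String Int × PySem.Dict String String)) (item : String) :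
    List String × (PySem.Dict String Int × PySem.Dict String String) :=
  let v := d0.getD item ""
  if v.toList.length == 1 then ((PySem.List.remove? st.1 v).getD st.1, st.2)
  else (st.1, v.toList.foldl (ufIndexStep item) st.2)

-- body of B's final pass over the remaining digits
def ufStep2B (ci : PySem.Dict String Int × PySem.Dict String String)
    (d : PySem.Dict String String) (ns : String) : PySem.Dict String String :=
  if ci.1.getD ns 0 == 1 then
    let cell := ci.2.getD ns ""
    if PySem.Chars.isIn ns.toList (d.getD cell "").toList then d.insert cell ns else d
  else d

def uniqueFunction_alt (group : List String) (data : List (String × String)) : List (String × String) :=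
  if group.length == 9 then
    let d0 : PySem.Dict String String := PySem.Dict.mk data
    let st := group.foldl (ufStep1B d0)
      ((PySem.List.pyRange 1 10 1).map PySem.Int.toStr, (PySem.Dict.empty, PySem.Dict.empty))
    (st.1.foldl (ufStep2B st.2) d0).items
  else data

-- ===== PRECONDITION & SPEC =====
def nineDigits : List String := ["1", "2", "3", "4", "5", "6", "7", "8", "9"]

-- the values of the solved (length-1) cells of the group, in group order, with multiplicity
def solvedVals (group : List String) (data : List (String × String)) : List String :=
  group.filterMap (fun it =>
    if ((PySem.Dict.mk data).getD it "").toList.length = 1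
    then some ((PySem.Dict.mk data).getD it "") else none)

-- Pre_ excludes exactly the inputs on which the Python A raises: a 9-cell group with a key missing
-- from data (KeyError on data[item]) or whose solved values repeat or fall outside '1'..'9'
-- (ValueError in notDoneList.remove).
def Pre_uniqueFunction (group : List String) (data : List (String × String)) : Prop :=
  group.length = 9 →
    (∀ it ∈ group, it ∈ (PySem.Dict.mk data).keys) ∧
    (solvedVals group data).Nodup ∧
    (∀ v ∈ solvedVals group data, v ∈ nineDigits)

instance (group : List String) (data : List (String × String)) :
    Decidable (Pre_uniqueFunction group data) := by unfold Pre_uniqueFunction; infer_instance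

def pvWitness_uniqueFunction : List String × (List (String × String)) :=
  (["a", "b", "c", "d", "e", "f", "g", "h", "i"],
   [("a", "1"), ("b", "2"), ("c", "3"), ("d", "4"), ("e", "57"), ("f", "67"),
    ("g", "57"), ("h", "89"), ("i", "89")])

def Spec_uniqueFunction (group : List String) (data : List (String × String)) (out : List (String × String)) : Prop := out = uniqueFunction_alt group data
instance (group : List String) (data : List (String × String)) (out : List (String × String)) : Decidable (Spec_uniqueFunction group data out) := by unfold Spec_uniqueFunction; infer_instance

-- ===== CLAIM (what is proved, stated in full; the proofs are below) =====
def Claim_equal_uniqueFunction : Prop := ∀ (group : List String) (data : List (String × String)), Dom_uniqueFunction group data → Pre_uniqueFunction group data → Spec_uniqueFunction group data (uniqueFunction group data)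

-- ===== LEMMAS AND PROOFS =====

-- original value of a cell, as chars
def vlOf (data : List (String × String)) (it : String) : List Char :=
  ((PySem.Dict.mk data).getD it "").toList

-- chars a cell contributes to notDoneString (nothing if it is solved)
def gOf (data : List (String × String)) (it : String) : List Char :=
  if (vlOf data it).length = 1 then [] else vlOf data it

def ndsOf (group : List String) (data : List (String × String)) : List Char :=
  group.flatMap (gOf data)

def removeAll (l : List String) (ss : List String) : List String :=
  ss.foldl (fun l v => (PySem.List.remove? l v).getD l) l

-- the (item, char) pairs B indexes, in visit order
def chOf (group : List String) (data : List (String × String)) : List (String × Char) :=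
  group.flatMap (fun it => if (vlOf data it).length = 1 then []
                           else (vlOf data it).map (fun c => (it, c)))

-- B's index step on an (item, char) pair
def pairStep (q : PySem.Dict String Int × PySem.Dict String String) (p : String × Char) :
    PySem.Dict String Int × PySem.Dict String String := ufIndexStep p.1 q p.2

theorem go_singleton (c : Char) (fuel : Nat) : ∀ (l : List Char) (acc : Nat), l.length ≤ fuel →
    PySem.Chars.count.go [c] fuel l acc = acc + l.count c := by
  induction fuel with
  | zero => intro l acc h; rw [PySem.Chars.count.go]; cases l with
    | nil => simp
    | cons a t => simp at h
  | succ n ih =>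
    intro l acc h
    cases l with
    | nil => rw [PySem.Chars.count.go]; simp; omega
    | cons a t =>
      rw [PySem.Chars.count.go]
      by_cases hc : c = a
      · subst hc
        simp [List.isPrefixOf, ih t (acc+1) (by simpa using h)]
        omega
      · simp [List.isPrefixOf, Ne.symm hc, hc, ih t acc (by simpa using h)]

theorem count_singleton (cs : List Char) (c : Char) : PySem.Chars.count cs [c] = cs.count c := by
  simp [PySem.Chars.count, go_singleton c cs.length cs 0 le_rfl]

theorem phase1A (data : List (String × String)) : ∀ (group : List String) (l0 : List String) (cs0 : List Char),
    group.foldl (ufStep1A (PySem.Dict.mk data)) (l0, cs0)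
      = (removeAll l0 (solvedVals group data), cs0 ++ ndsOf group data) := by
  intro group
  induction group with
  | nil => intro l0 cs0; simp [solvedVals, ndsOf, removeAll]
  | cons it t ih =>
    intro l0 cs0
    by_cases h1 : ((PySem.Dict.mk data).getD it "").length = 1
    · simp [ufStep1A, solvedVals, ndsOf, gOf, vlOf, h1, ih, removeAll]
    · simp [ufStep1A, solvedVals, ndsOf, gOf, vlOf, h1, ih]

theorem phase1B (data : List (String × String)) : ∀ (group : List String) (l0 : List String)
    (q0 : PySem.Dict String Int × PySem.Dict String String),
    group.foldl (ufStep1B (PySem.Dict.mk data)) (l0, q0)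
      = (removeAll l0 (solvedVals group data), (chOf group data).foldl pairStep q0) := by
  intro group
  induction group with
  | nil => intro l0 q0; simp [solvedVals, chOf, removeAll]
  | cons it t ih =>
    intro l0 q0
    by_cases h1 : ((PySem.Dict.mk data).getD it "").length = 1
    · simp [ufStep1B, solvedVals, chOf, vlOf, h1, ih, removeAll]
    · simp [ufStep1B, solvedVals, chOf, vlOf, h1, ih, List.foldl_map, pairStep]

theorem cnt_getD (c : Char) : ∀ (L : List (String × Char)) (q : PySem.Dict String Int × PySem.Dict String String),
    ((L.foldl pairStep q).1).getD (String.ofList [c]) 0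
      = q.1.getD (String.ofList [c]) 0 + ((L.map Prod.snd).count c : Int) := by
  intro L
  induction L with
  | nil => intro q; simp
  | cons p t ih =>
    intro q
    rw [List.foldl_cons, ih]
    by_cases hc : p.2 = c
    · simp [pairStep, ufIndexStep, hc]
      ring
    · have : String.ofList [c] ≠ String.ofList [p.2] := by
        intro h; exact hc (by simpa using (congrArg String.toList h).symm)
      simp [pairStep, ufIndexStep, PySem.Dict.getD_insert, this, hc]

theorem hold_getD (c : Char) : ∀ (L : List (String × Char)) (q : PySem.Dict String Int × PySem.Dict String String) (dflt : String),
    ((L.foldl pairStep q).2).getD (String.ofList [c]) dflt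
      = ((L.filter (fun p => p.2 == c)).map Prod.fst).getLastD (q.2.getD (String.ofList [c]) dflt) := by
  intro L
  induction L with
  | nil => intro q dflt; simp
  | cons p t ih =>
    intro q dflt
    rw [List.foldl_cons, ih]
    by_cases hc : p.2 = c
    · have h2 : ((pairStep q p).2).getD (String.ofList [c]) dflt = p.1 := by
        simp [pairStep, ufIndexStep, hc]
      rw [h2, List.filter_cons_of_pos (by simp [hc]), List.map_cons, List.getLastD_cons]
    · have : String.ofList [c] ≠ String.ofList [p.2] := by
        intro h; exact hc (by simpa using (congrArg String.toList h).symm)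
      simp [pairStep, ufIndexStep, PySem.Dict.getD_insert, this, hc]

theorem chOf_map_snd (group : List String) (data : List (String × String)) :
    (chOf group data).map Prod.snd = ndsOf group data := by
  induction group with
  | nil => simp [chOf, ndsOf]
  | cons it t ih =>
    by_cases h1 : (vlOf data it).length = 1 <;>
      simp [chOf, ndsOf, gOf, h1, List.flatMap_cons] at * <;> simp [ih]

theorem chOf_filter (group : List String) (data : List (String × String)) (c : Char) :
    ((chOf group data).filter (fun p => p.2 == c)).map Prod.fst
      = group.flatMap (fun it => List.replicate ((gOf data it).count c) it) := by
  induction group with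
  | nil => simp [chOf]
  | cons it t ih =>
    by_cases h1 : (vlOf data it).length = 1
    · simp [chOf, gOf, h1, List.flatMap_cons] at *; simp [ih]
    · rw [show chOf (it::t) data = (vlOf data it).map (fun c => (it,c)) ++ chOf t data by
        simp [chOf, h1, List.flatMap_cons]]
      rw [List.flatMap_cons, show gOf data it = vlOf data it by simp [gOf, h1]]
      rw [List.filter_append, List.map_append, ih]
      congr 1
      rw [List.filter_map, List.map_map]
      have : ((fun p : String × Char => p.2 == c) ∘ fun c => (it, c)) = (fun x => x == c) := rfl
      rw [this, List.filter_beq]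
      simp [List.map_replicate]

theorem count_le_flatMap (g : String → List Char) (c : Char) : ∀ (t : List String) (h : String),
    h ∈ t → (g h).count c ≤ (t.flatMap g).count c := by
  intro t
  induction t with
  | nil => simp
  | cons a s ih =>
    intro h hm
    rw [List.flatMap_cons, List.count_append]
    rcases List.mem_cons.mp hm with rfl | hm'
    · omega
    · have := ih h hm'; omega

theorem unique_of_count_one (g : String → List Char) (c : Char) : ∀ (gr : List String),
    (gr.flatMap g).count c = 1 →
    ∃ h ∈ gr, (g h).count c = 1 ∧ gr.count h = 1 ∧ ∀ it ∈ gr, it ≠ h → (g it).count c = 0 := by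
  intro gr
  induction gr with
  | nil => simp
  | cons a t ih =>
    intro hcount
    rw [List.flatMap_cons, List.count_append] at hcount
    by_cases ha : (g a).count c = 0
    · have ht : (t.flatMap g).count c = 1 := by omega
      obtain ⟨h, hm, h1, hcnt, hoth⟩ := ih ht
      have hne : a ≠ h := fun he => by rw [he] at ha; omega
      refine ⟨h, List.mem_cons_of_mem a hm, h1, ?_, ?_⟩
      · rw [List.count_cons]; simp [hcnt, hne]
      · intro it hit hne'
        rcases List.mem_cons.mp hit with rfl | h' 
        · exact ha
        · exact hoth it h' hne'
    · have ha1 : (g a).count c = 1 := by omega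
      have ht : (t.flatMap g).count c = 0 := by omega
      have hnotin : a ∉ t := by
        intro hm
        have := count_le_flatMap g c t a hm
        omega
      refine ⟨a, List.mem_cons_self, ha1, ?_, ?_⟩
      · simp [List.count_eq_zero_of_not_mem hnotin]
      · intro it hit hne'
        rcases List.mem_cons.mp hit with rfl | h'
        · exact absurd rfl hne'
        · have := count_le_flatMap g c t it h'; omega

theorem flatMap_replicate_singleton (f : String → Nat) (h : String) : ∀ (gr : List String),
    h ∈ gr → f h = 1 → gr.count h = 1 → (∀ it ∈ gr, it ≠ h → f it = 0) →
    gr.flatMap (fun it => List.replicate (f it) it) = [h] := by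
  intro gr
  induction gr with
  | nil => simp
  | cons a t ih =>
    intro hm hf hcnt hoth
    rw [List.flatMap_cons]
    by_cases hah : a = h
    · subst hah
      have hnotin : a ∉ t := by
        rw [List.count_cons_self] at hcnt
        exact List.count_eq_zero.mp (by omega)
      have hzero : ∀ it ∈ t, f it = 0 := by
        intro it hit
        exact hoth it (List.mem_cons_of_mem a hit) (fun he => hnotin (he ▸ hit))
      have : t.flatMap (fun it => List.replicate (f it) it) = [] := by
        rw [List.flatMap_eq_nil_iff]
        intro x hx
        rw [hzero x hx, List.replicate_zero]
      simp [hf, this]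
    · have hm' : h ∈ t := by rcases List.mem_cons.mp hm with rfl | h'; exact absurd rfl hah; exact h'
      have : f a = 0 := hoth a List.mem_cons_self hah
      rw [this]
      simp only [List.replicate_zero, List.nil_append]
      exact ih hm' hf (by rw [List.count_cons] at hcnt; simpa [hah] using hcnt)
        (fun it hit => hoth it (List.mem_cons_of_mem a hit))

theorem scan_skip (ns : String) (c : Char) (hns : ns.toList = [c]) :
    ∀ (t : List String) (d : PySem.Dict String String),
    (∀ it ∈ t, (d.getD it "").toList.count c ≠ 1) → t.foldl (ufScanStep ns) d = d := by
  intro t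
  induction t with
  | nil => intro d _; rfl
  | cons a s ih =>
    intro d hd
    rw [List.foldl_cons]
    have : ufScanStep ns d a = d := by
      rw [ufScanStep, hns, count_singleton]
      simp [hd a List.mem_cons_self]
    rw [this]
    exact ih d (fun it hit => hd it (List.mem_cons_of_mem a hit))

theorem scan_eq (ns : String) (c : Char) (hns : ns.toList = [c]) :
    ∀ (gr : List String) (d : PySem.Dict String String) (h : String),
    gr.count h = 1 → (∀ it ∈ gr, it ≠ h → (d.getD it "").toList.count c = 0) →
    gr.foldl (ufScanStep ns) d
      = if (d.getD h "").toList.count c = 1 then d.insert h ns else d := by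
  intro gr
  induction gr with
  | nil => intro d h hcnt _; simp [List.count_nil] at hcnt
  | cons a t ih =>
    intro d h hcnt hoth
    rw [List.foldl_cons]
    by_cases hah : a = h
    · subst hah
      have hnotin : a ∉ t := by
        rw [List.count_cons_self] at hcnt
        exact List.count_eq_zero.mp (by omega)
      by_cases hc : (d.getD a "").toList.count c = 1
      · have hstep : ufScanStep ns d a = d.insert a ns := by
          rw [ufScanStep, hns, count_singleton]; simp [hc]
        rw [hstep, if_pos hc]
        apply scan_skip ns c hns
        intro it hit
        have hne : it ≠ a := fun he => hnotin (he ▸ hit)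
        rw [PySem.Dict.getD_insert]
        rw [if_neg hne]
        rw [hoth it (List.mem_cons_of_mem a hit) hne]
        omega
      · have hstep : ufScanStep ns d a = d := by
          rw [ufScanStep, hns, count_singleton]; simp [hc]
        rw [hstep, if_neg hc]
        apply scan_skip ns c hns
        intro it hit
        have hne : it ≠ a := fun he => hnotin (he ▸ hit)
        rw [hoth it (List.mem_cons_of_mem a hit) hne]
        omega
    · have hstep : ufScanStep ns d a = d := by
        rw [ufScanStep, hns, count_singleton]
        rw [hoth a List.mem_cons_self hah]
        simp
      rw [hstep]
      exact ih d h (by rw [List.count_cons] at hcnt; simpa [hah] using hcnt)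
        (fun it hit => hoth it (List.mem_cons_of_mem a hit))

theorem nine_char : ∀ ns ∈ nineDigits, ∃ c, ns.toList = [c] := by
  intro ns hm
  simp only [nineDigits, List.mem_cons, List.not_mem_nil, or_false] at hm
  rcases hm with rfl|rfl|rfl|rfl|rfl|rfl|rfl|rfl|rfl
  exacts [⟨'1', by decide⟩, ⟨'2', by decide⟩, ⟨'3', by decide⟩, ⟨'4', by decide⟩,
    ⟨'5', by decide⟩, ⟨'6', by decide⟩, ⟨'7', by decide⟩, ⟨'8', by decide⟩, ⟨'9', by decide⟩]

theorem removeAll_filter : ∀ (S l : List String), S.Nodup → (∀ v ∈ S, v ∈ l) → l.Nodup →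
    removeAll l S = l.filter (fun x => decide (x ∉ S)) := by
  unfold removeAll
  intro S
  induction S with
  | nil => intro l _ _ _; simp
  | cons v S ih =>
    intro l hnd hmem hlnd
    rw [List.foldl_cons]
    rw [PySem.List.remove?_eq_some_erase l v (hmem v List.mem_cons_self)]
    simp only [Option.getD_some]
    rw [(List.Nodup.erase_eq_filter hlnd v)]
    rw [ih _ hnd.of_cons (fun w hw => ?_) (hlnd.filter _)]
    · rw [List.filter_filter]
      apply List.filter_congr
      intro x hx
      simp only [List.mem_cons]
      by_cases hxv : x = v <;> simp [hxv]
    · rw [List.mem_filter]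
      refine ⟨hmem w (List.mem_cons_of_mem v hw), ?_⟩
      have : w ≠ v := fun he => (List.nodup_cons.mp hnd).1 (he ▸ hw)
      simp [this]

theorem mem_solvedVals (group : List String) (data : List (String × String)) (it : String)
    (hit : it ∈ group) (hl : ((PySem.Dict.mk data).getD it "").toList.length = 1) :
    (PySem.Dict.mk data).getD it "" ∈ solvedVals group data :=
  List.mem_filterMap.mpr ⟨it, hit, by simp [hl]⟩

theorem phase2 (group : List String) (data : List (String × String))
    :
    ∀ (rest : List String) (d : PySem.Dict String String),
    rest.Nodup →
    (∀ ns ∈ rest, ns ∈ nineDigits ∧ ns ∉ solvedVals group data) →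
    (∀ it ∈ group, d.getD it "" = (PySem.Dict.mk data).getD it "" ∨
       ((vlOf data it).length ≠ 1 ∧ ∃ ns', ns' ∈ nineDigits ∧ ns' ∉ rest ∧ d.getD it "" = ns')) →
    rest.foldl (ufStep2A group (ndsOf group data)) d
      = rest.foldl (ufStep2B ((chOf group data).foldl pairStep (PySem.Dict.empty, PySem.Dict.empty))) d := by
  intro rest
  induction rest with
  | nil => intro d _ _ _; rfl
  | cons ns rest ih =>
    intro d hnd hmem hinv
    obtain ⟨hns9, hnsSv⟩ := hmem ns List.mem_cons_self
    obtain ⟨c, hc⟩ := nine_char ns hns9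
    have hnsc : ns = String.ofList [c] := String.toList_inj.mp (by rw [hc, String.toList_ofList])
    have hcntB : ((chOf group data).foldl pairStep (PySem.Dict.empty, PySem.Dict.empty)).1.getD ns 0
        = ((ndsOf group data).count c : Int) := by
      rw [hnsc, cnt_getD, chOf_map_snd]
      simp [PySem.Dict.getD_empty]
    rw [List.foldl_cons, List.foldl_cons]
    have hinv' : ∀ (d' : PySem.Dict String String),
        (∀ it ∈ group, d'.getD it "" = (PySem.Dict.mk data).getD it "" ∨
          ((vlOf data it).length ≠ 1 ∧ ∃ ns', ns' ∈ nineDigits ∧ ns' ∉ ns :: rest ∧ d'.getD it "" = ns')) →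
        (∀ it ∈ group, d'.getD it "" = (PySem.Dict.mk data).getD it "" ∨
          ((vlOf data it).length ≠ 1 ∧ ∃ ns', ns' ∈ nineDigits ∧ ns' ∉ rest ∧ d'.getD it "" = ns')) := by
      intro d' hv it hit
      rcases hv it hit with heq | ⟨hl, ns', h9', hnr', heq⟩
      · exact Or.inl heq
      · exact Or.inr ⟨hl, ns', h9', fun hr => hnr' (List.mem_cons_of_mem ns hr), heq⟩
    by_cases hone : (ndsOf group data).count c = 1
    · -- unique candidate: find the holder h
      obtain ⟨h, hhm, hh1, hhcnt, hoth⟩ := unique_of_count_one (gOf data) c group hone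
      have hhl : (vlOf data h).length ≠ 1 := by
        intro hl
        rw [gOf, if_pos hl] at hh1
        simp at hh1
      have hvh : (vlOf data h).count c = 1 := by rwa [gOf, if_neg hhl] at hh1
      have horig : ∀ it ∈ group, it ≠ h → (vlOf data it).count c = 0 := by
        intro it hit hne
        by_cases hl : (vlOf data it).length = 1
        · obtain ⟨c', hc'⟩ := List.length_eq_one_iff.mp hl
          rw [hc']
          have hmemS : (PySem.Dict.mk data).getD it "" ∈ solvedVals group data :=
            mem_solvedVals group data it hit hl
          have hcc : c' ≠ c := by
            intro he
            apply hnsSv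
            have hv : (PySem.Dict.mk data).getD it "" = ns := by
              apply String.toList_inj.mp
              rw [hc]
              show vlOf data it = [c]
              rw [hc', he]
            rw [← hv]
            exact hmemS
          simp [hcc]
        · have := hoth it hit hne; rwa [gOf, if_neg hl] at this
      have hcur : ∀ it ∈ group, it ≠ h → (d.getD it "").toList.count c = 0 := by
        intro it hit hne
        rcases hinv it hit with heq | ⟨_, ns', h9', hnr', heq⟩
        · rw [heq]; exact horig it hit hne
        · rw [heq]
          obtain ⟨c2, hc2⟩ := nine_char ns' h9'
          rw [hc2]
          have hc2c : c2 ≠ c := by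
            intro he
            apply hnr'
            have : ns' = ns := String.toList_inj.mp (by rw [hc2, hc, he])
            rw [this]; exact List.mem_cons_self
          simp [hc2c]
      have hA : ufStep2A group (ndsOf group data) d ns
          = if (d.getD h "").toList.count c = 1 then d.insert h ns else d := by
        rw [ufStep2A, hc, count_singleton, if_pos (by simp [hone])]
        exact scan_eq ns c hc group d h hhcnt hcur
      have hcell : ((chOf group data).foldl pairStep (PySem.Dict.empty, PySem.Dict.empty)).2.getD ns "" = h := by
        rw [hnsc, hold_getD, chOf_filter,
          flatMap_replicate_singleton (fun it => (gOf data it).count c) h group hhm hh1 hhcnt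
            (fun it hi hne => hoth it hi hne)]
        rfl
      have hB : ufStep2B ((chOf group data).foldl pairStep (PySem.Dict.empty, PySem.Dict.empty)) d ns
          = if (d.getD h "").toList.count c = 1 then d.insert h ns else d := by
        rw [ufStep2B, if_pos (by rw [hcntB]; simp [hone])]
        show (if PySem.Chars.isIn ns.toList (d.getD _ "").toList then _ else _) = _
        rw [hcell]
        rcases hinv h hhm with heq | ⟨_, ns', h9', hnr', heq⟩
        · rw [heq]
          have hcount1 : ((PySem.Dict.mk data).getD h "").toList.count c = 1 := hvh
          have hmemc : c ∈ ((PySem.Dict.mk data).getD h "").toList :=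
            List.count_pos_iff.mp (by omega)
          have hin : PySem.Chars.isIn ns.toList ((PySem.Dict.mk data).getD h "").toList = true := by
            rw [hc, PySem.Chars.isIn_iff_infix, List.singleton_infix_iff]
            exact hmemc
          rw [if_pos hin, if_pos hcount1]
        · rw [heq]
          obtain ⟨c2, hc2⟩ := nine_char ns' h9'
          have hc2c : c2 ≠ c := by
            intro he
            apply hnr'
            have : ns' = ns := String.toList_inj.mp (by rw [hc2, hc, he])
            rw [this]; exact List.mem_cons_self
          have hin : PySem.Chars.isIn ns.toList (ns' : String).toList = false := by
            rw [hc, hc2]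
            rw [show PySem.Chars.isIn [c] [c2] = false from ?_]
            rw [Bool.eq_false_iff]
            intro htr
            rw [PySem.Chars.isIn_iff_infix, List.singleton_infix_iff] at htr
            simp at htr
            exact hc2c htr.symm
          rw [if_neg (by simp [hin]), if_neg (by rw [hc2]; simp [hc2c])]
      rw [hA, hB]
      by_cases hins : (d.getD h "").toList.count c = 1
      · rw [if_pos hins]
        apply ih (d.insert h ns) hnd.of_cons
          (fun x hx => hmem x (List.mem_cons_of_mem ns hx))
        intro it hit
        by_cases hih : it = h
        · subst hih
          refine Or.inr ⟨hhl, ns, hns9, (List.nodup_cons.mp hnd).1, ?_⟩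
          rw [PySem.Dict.getD_insert, if_pos rfl]
        · rw [PySem.Dict.getD_insert, if_neg hih]
          exact hinv' d hinv it hit
      · rw [if_neg hins]
        exact ih d hnd.of_cons (fun x hx => hmem x (List.mem_cons_of_mem ns hx)) (hinv' d hinv)
    · have hA : ufStep2A group (ndsOf group data) d ns = d := by
        rw [ufStep2A, hc, count_singleton, if_neg (by simp [hone])]
      have hB : ufStep2B ((chOf group data).foldl pairStep (PySem.Dict.empty, PySem.Dict.empty)) d ns = d := by
        rw [ufStep2B, if_neg (by rw [hcntB]; simp; exact_mod_cast hone)]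
      rw [hA, hB]
      exact ih d hnd.of_cons (fun x hx => hmem x (List.mem_cons_of_mem ns hx)) (hinv' d hinv)

-- ===== VERDICT (by name: the statement is the Claim_ definition above) =====
theorem uniqueFunction_spec : Claim_equal_uniqueFunction := by
  intro group data _ hpre
  show uniqueFunction group data = uniqueFunction_alt group data
  by_cases h9 : group.length = 9
  · obtain ⟨hkeys, hnod, hsub⟩ := hpre h9
    rw [uniqueFunction, uniqueFunction_alt, if_pos (by simp [h9]), if_pos (by simp [h9])]
    simp only [phase1A, phase1B, List.nil_append]
    rw [show nineNumberList = nineDigits by decide,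
        show (PySem.List.pyRange 1 10 1).map PySem.Int.toStr = nineDigits by decide]
    have hfil := removeAll_filter (solvedVals group data) nineDigits hnod hsub (by decide)
    apply congrArg PySem.Dict.items
    apply phase2 group data
    · rw [hfil]; exact (by decide : nineDigits.Nodup).filter _
    · intro ns hns
      rw [hfil, List.mem_filter] at hns
      exact ⟨hns.1, by simpa using hns.2⟩
    · intro it _; exact Or.inl rfl
  · rw [uniqueFunction, uniqueFunction_alt, if_neg (by simp [h9]), if_neg (by simp [h9])]
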